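-- pv_equiv track=rewrite | github.com/robertreimann/dsa | Backtracking/substrings.py | generate
-- ===== SOURCE A (Python) =====
-- def generate(s):
--     answer = []
--     for i in range(len(s)):
--         substring = ""
--         for j in range(i, len(s)):
--             substring += s[j]
--             answer.append(substring)
--
--     return sorted(list(answer), key=lambda x: (len(x), x[0]))
-- ===== SOURCE B (Python) =====
-- def generate(s):
--     # Bucket construction: lengths ascending as the outer dimension; within a
--     # length, substrings are bucketed by first character (filled in ascending
--     # start order) and buckets are emitted in sorted key order. This replaces
--     # A's global stable sort of all substrings.
--     n = len(s)
--     answer = []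
--     for L in range(1, n + 1):
--         buckets = {}
--         for i in range(n - L + 1):
--             buckets.setdefault(s[i], []).append(s[i:i + L])
--         for c in sorted(buckets):
--             answer.extend(buckets[c])
--     return answer
-- ===== Notes on version B (the rewrite author's own statement) =====
-- stated objective: alternative
-- what changed: Replaces A's generate-all-then-global-stable-sort with a length-major generation that buckets each length's substrings by first character (a bucket sort on the key) and emits buckets in sorted key order, so no comparison sort over the O(n^2) substrings is performed.
import Mathlib
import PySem

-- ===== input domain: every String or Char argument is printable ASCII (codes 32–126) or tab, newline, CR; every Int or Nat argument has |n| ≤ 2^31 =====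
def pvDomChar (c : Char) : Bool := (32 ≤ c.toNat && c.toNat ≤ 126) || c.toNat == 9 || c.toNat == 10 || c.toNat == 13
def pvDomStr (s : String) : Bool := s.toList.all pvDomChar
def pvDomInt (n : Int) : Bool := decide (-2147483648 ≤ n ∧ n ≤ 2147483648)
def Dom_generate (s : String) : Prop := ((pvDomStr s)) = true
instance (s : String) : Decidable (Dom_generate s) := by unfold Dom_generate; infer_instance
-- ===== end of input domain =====

-- B replaces A's generate-all-then-global-stable-sort with length-major generation
-- into per-first-character buckets emitted in sorted key order (objective: alternative).

-- ===== PORT A =====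
-- A on the code-point list: nested index loops growing `substring`, then a
-- stable sort of all substrings by the tuple key (len(x), x[0]).
def genAcore (cs : List Char) : List (List Char) :=
  let answer := (PySem.List.pyRange 0 (cs.length : Int) 1).foldl
    (fun answer i =>
      ((PySem.List.pyRange i (cs.length : Int) 1).foldl
        (fun (st : List Char × List (List Char)) j =>
          let substring := st.1 ++ [PySem.List.pyGetD cs j ' ']
          (substring, st.2 ++ [substring]))
        ([], answer)).2)
    []
  PySem.List.sorted2 answer (fun x => x.length) (fun x => PySem.List.pyGetD x 0 ' ')

def generate (s : String) : List String := (genAcore s.toList).map String.ofList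

-- ===== PORT B =====
-- B on the code-point list: for each length L, bucket the slices s[i:i+L] by
-- their first character in a dict, then emit the buckets in sorted key order.
def genBcore (cs : List Char) : List (List Char) :=
  let n := cs.length
  (PySem.List.pyRange 1 ((n : Int) + 1) 1).foldl
    (fun answer L =>
      let buckets := (PySem.List.pyRange 0 ((n : Int) - L + 1) 1).foldl
        (fun (d : PySem.Dict Char (List (List Char))) i =>
          d.modify (PySem.List.pyGetD cs i ' ') [] (· ++ [PySem.List.slice cs (some i) (some (i + L))]))
        PySem.Dict.empty
      (PySem.List.sorted buckets.keys (fun c => c)).foldl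
        (fun answer c => answer ++ buckets.getD c [])
        answer)
    []

def generate_alt (s : String) : List String := (genBcore s.toList).map String.ofList

-- ===== PRECONDITION & SPEC =====
def Spec_generate (s : String) (out : List String) : Prop := out = generate_alt s
instance (s : String) (out : List String) : Decidable (Spec_generate s out) := by unfold Spec_generate; infer_instance

-- ===== CLAIM (what is proved, stated in full; the proofs are below) =====
def Claim_equal_generate : Prop := ∀ (s : String), Dom_generate s → Spec_generate s (generate s)

-- ===== LEMMAS AND PROOFS =====

-- The sort key of A, packaged as a lexicographic pair.
def pvK (x : List Char) : ℕ ×ₗ Char := toLex (x.length, x.getD 0 ' ')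

-- The distinct first characters of the length-(t+1) substrings, sorted (B's bucket keys).
def pvChars (cs : List Char) (t : Nat) : List Char :=
  PySem.List.sorted (PySem.Set.ofList ((List.range (cs.length - t)).map (fun i => cs.getD i ' '))) (fun c => c)

-- B's bucket for length t+1 and first character c.
def pvBucket (cs : List Char) (t : Nat) (c : Char) : List (List Char) :=
  ((List.range (cs.length - t)).filter (fun i => cs.getD i ' ' == c)).map
    (fun i => (cs.drop i).take (t + 1))

-- All keys that occur, in the emitted order.
def pvKs (cs : List Char) : List (ℕ ×ₗ Char) :=
  (List.range cs.length).flatMap (fun t => (pvChars cs t).map (fun c => toLex (t + 1, c)))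

-- A's unsorted answer list, in generation order.
def pvAnswer (cs : List Char) : List (List Char) :=
  (List.range cs.length).flatMap
    (fun i => (List.range (cs.length - i)).map (fun t => (cs.drop i).take (t + 1)))

-- insertBy structural equation (definitional).
theorem pvInsertBy_cons {α : Type} (bf : α → α → Bool) (x y : α) (ys : List α) :
    PySem.List.insertBy bf x (y :: ys) =
      if bf x y then x :: y :: ys else y :: PySem.List.insertBy bf x ys := rfl

theorem pvInsertBy_append_not_before {α : Type} (bf : α → α → Bool) (x : α)
    (g rest : List α) (h : ∀ y ∈ g, bf x y = false) :
    PySem.List.insertBy bf x (g ++ rest) = g ++ PySem.List.insertBy bf x rest := by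
  induction g with
  | nil => simp
  | cons y ys ih =>
      simp only [List.cons_append, pvInsertBy_cons, h y (by simp)]
      simp only [Bool.false_eq_true, if_false, List.cons.injEq, true_and]
      exact ih (fun z hz => h z (by simp [hz]))

theorem pvInsertBy_all_before {α : Type} (bf : α → α → Bool) (x : α)
    (rest : List α) (h : ∀ y ∈ rest, bf x y = true) :
    PySem.List.insertBy bf x rest = x :: rest := by
  cases rest with
  | nil => rfl
  | cons y ys => simp [pvInsertBy_cons, h y (by simp)]

-- Inserting one element into a key-grouped list extends its own key's group.
theorem pvInsertBy_grouped {α κ : Type} [LinearOrder κ] (K : α → κ)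
    (bf : α → α → Bool) (hbef : ∀ a b, bf a b = decide (K a < K b))
    (xs : List α) (x : α) (ks : List κ) (hks : ks.Pairwise (· < ·)) (hx : K x ∈ ks) :
    PySem.List.insertBy bf x (ks.flatMap (fun k => xs.filter (fun y => decide (K y = k)))) =
      ks.flatMap (fun k => (xs ++ [x]).filter (fun y => decide (K y = k))) := by
  induction ks with
  | nil => cases hx
  | cons k ks' ih =>
      have hklt : ∀ k' ∈ ks', k < k' := (List.pairwise_cons.mp hks).1
      have htail : ks'.Pairwise (· < ·) := (List.pairwise_cons.mp hks).2
      have hmemtail : ∀ y ∈ ks'.flatMap (fun k => xs.filter (fun y => decide (K y = k))),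
          K y ∈ ks' := by
        intro y hy
        rcases List.mem_flatMap.mp hy with ⟨k', hk', hyf⟩
        have := of_decide_eq_true ((List.mem_filter.mp hyf).2)
        rw [this]; exact hk'
      have hgroup : ∀ k'', ∀ y ∈ xs.filter (fun y => decide (K y = k'')), K y = k'' := by
        intro k'' y hy
        exact of_decide_eq_true ((List.mem_filter.mp hy).2)
      simp only [List.flatMap_cons]
      rcases List.mem_cons.mp hx with hxk | hxk
      · -- K x = k : x goes right after the group of k
        rw [pvInsertBy_append_not_before bf x _ _ (by
          intro y hy
          rw [hbef, hgroup k y hy, hxk]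
          simp)]
        rw [pvInsertBy_all_before bf x _ (by
          intro y hy
          rw [hbef]
          exact decide_eq_true (hxk ▸ hklt _ (hmemtail y hy)))]
        have h1 : (xs ++ [x]).filter (fun y => decide (K y = k)) =
            xs.filter (fun y => decide (K y = k)) ++ [x] := by
          rw [List.filter_append]; simp [hxk]
        have h2 : ks'.flatMap (fun k' => (xs ++ [x]).filter (fun y => decide (K y = k'))) =
            ks'.flatMap (fun k' => xs.filter (fun y => decide (K y = k'))) := by
          apply List.flatMap_congr
          intro k' hk'
          rw [List.filter_append]
          have : K x ≠ k' := ne_of_lt (hxk ▸ hklt _ hk')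
          simp [this]
        rw [h1, h2]
        simp
      · -- k < K x : x is inserted further right, into the tail groups
        have hklt' : k < K x := hklt _ hxk
        rw [pvInsertBy_append_not_before bf x _ _ (by
          intro y hy
          rw [hbef, hgroup k y hy]
          simp [not_lt_of_gt hklt'])]
        rw [ih htail hxk]
        have h1 : (xs ++ [x]).filter (fun y => decide (K y = k)) =
            xs.filter (fun y => decide (K y = k)) := by
          rw [List.filter_append]
          simp [ne_of_gt hklt']
        rw [h1]

-- Stable insertion sort produces the key-grouped concatenation.
theorem pvFoldl_insertBy_fibers {α κ : Type} [LinearOrder κ] (K : α → κ)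
    (bf : α → α → Bool) (hbef : ∀ a b, bf a b = decide (K a < K b))
    (xs : List α) (ks : List κ) (hks : ks.Pairwise (· < ·))
    (hcov : ∀ x ∈ xs, K x ∈ ks) :
    xs.foldl (fun acc x => PySem.List.insertBy bf x acc) [] =
      ks.flatMap (fun k => xs.filter (fun y => decide (K y = k))) := by
  induction xs using List.reverseRecOn with
  | nil => simp
  | append_singleton xs x ih =>
      rw [List.foldl_append, List.foldl_cons, List.foldl_nil,
        ih (fun y hy => hcov y (by simp [hy])),
        pvInsertBy_grouped K bf hbef xs x ks hks (hcov x (by simp))]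

-- The inner loop of A: growing `substring` over ys collects the prefixes of ys.
theorem pvPrefFold (ys : List Char) : ∀ (p : List Char) (acc : List (List Char)),
    ys.foldl (fun (st : List Char × List (List Char)) c => (st.1 ++ [c], st.2 ++ [st.1 ++ [c]])) (p, acc)
      = (p ++ ys, acc ++ (List.range ys.length).map (fun t => p ++ ys.take (t + 1))) := by
  induction ys with
  | nil => simp
  | cons c ys ih =>
      intro p acc
      rw [List.foldl_cons, ih]
      refine Prod.ext (by simp) ?_
      simp only [List.length_cons, List.range_succ_eq_map, List.map_cons, List.map_map]
      simp [Function.comp_def, List.take_succ_cons, List.append_assoc]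

theorem genAcore_answer (cs : List Char) :
    ((PySem.List.pyRange 0 (cs.length : Int) 1).foldl
      (fun answer i =>
        ((PySem.List.pyRange i (cs.length : Int) 1).foldl
          (fun (st : List Char × List (List Char)) j =>
            let substring := st.1 ++ [PySem.List.pyGetD cs j ' ']
            (substring, st.2 ++ [substring]))
          ([], answer)).2)
      []) = pvAnswer cs := by
  rw [show ((cs.length : Int)) = ((cs.length : Nat) : Int) from rfl, PySem.List.pyRange_zero_nat,
    List.foldl_map]
  have hbody : (fun (answer : List (List Char)) (k : Nat) =>
      ((PySem.List.pyRange (k : Int) (cs.length : Int) 1).foldl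
        (fun (st : List Char × List (List Char)) j =>
          let substring := st.1 ++ [PySem.List.pyGetD cs j ' ']
          (substring, st.2 ++ [substring]))
        ([], answer)).2) =
      (fun answer k => answer ++
        (List.range (cs.length - k)).map (fun t => (cs.drop k).take (t + 1))) := by
    funext answer k
    simp only []
    rw [PySem.List.foldl_pyRange_pyGetD' cs ' '
      (fun (st : List Char × List (List Char)) v => (st.1 ++ [v], st.2 ++ [st.1 ++ [v]]))
      ([], answer) (by positivity), Int.toNat_natCast, pvPrefFold]
    simp
  rw [hbody, PySem.List.foldl_append_eq_flatMap]
  simp [pvAnswer]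

-- A's comparison function IS the lexicographic order on pvK.
theorem pvBef_eq (a b : List Char) :
    (decide (a.length < b.length) ||
      (!decide (b.length < a.length) && decide (PySem.List.pyGetD a 0 ' ' < PySem.List.pyGetD b 0 ' '))) =
      decide (pvK a < pvK b) := by
  simp only [PySem.List.pyGetD_zero, pvK, Prod.Lex.toLex_lt_toLex]
  by_cases h1 : a.length < b.length <;> by_cases h2 : b.length < a.length
  · omega
  · simp [h1, h2]
  · simp [h1, h2, Nat.ne_of_lt' h2]
  · have : a.length = b.length := by omega
    simp [this]

theorem pvKs_pairwise (cs : List Char) : (pvKs cs).Pairwise (· < ·) := by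
  unfold pvKs
  rw [List.pairwise_flatMap]
  constructor
  · intro t _
    exact List.Pairwise.map _
      (fun a b hab => by simp [Prod.Lex.toLex_lt_toLex, hab])
      (PySem.List.sorted_ofList_pairwise_lt _)
  · refine List.pairwise_lt_range.imp ?_
    rintro t1 t2 h x hx y hy
    rcases List.mem_map.mp hx with ⟨c1, _, rfl⟩
    rcases List.mem_map.mp hy with ⟨c2, _, rfl⟩
    simp [Prod.Lex.toLex_lt_toLex]
    omega

theorem pvHead_take_drop (cs : List Char) (i t : Nat) :
    ((cs.drop i).take (t + 1)).getD 0 ' ' = cs.getD i ' ' := by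
  simp [List.getD, List.getElem?_drop]

theorem pvCover (cs : List Char) : ∀ x ∈ pvAnswer cs, pvK x ∈ pvKs cs := by
  intro x hx
  simp only [pvAnswer, List.mem_flatMap, List.mem_map, List.mem_range] at hx
  rcases hx with ⟨i, hi, t, ht, rfl⟩
  have hlen : ((cs.drop i).take (t + 1)).length = t + 1 := by
    simp; omega
  simp only [pvKs, List.mem_flatMap, List.mem_map, List.mem_range]
  refine ⟨t, by omega, cs.getD i ' ', ?_, by rw [pvK, hlen, pvHead_take_drop]⟩
  rw [pvChars, PySem.List.mem_sorted, PySem.Set.mem_ofList]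
  simp only [List.mem_map, List.mem_range]
  exact ⟨i, by omega, rfl⟩

theorem genAcore_eq (cs : List Char) :
    genAcore cs = (pvKs cs).flatMap (fun k => (pvAnswer cs).filter (fun y => decide (pvK y = k))) := by
  show PySem.List.sorted2 _ _ _ = _
  rw [genAcore_answer]
  simp only [PySem.List.sorted2]
  exact pvFoldl_insertBy_fibers pvK _ pvBef_eq (pvAnswer cs) (pvKs cs)
    (pvKs_pairwise cs) (pvCover cs)

theorem pvFlatMap_if_singleton {α β : Type} (l : List α) (p : α → Bool) (f : α → β) :
    l.flatMap (fun x => if p x then [f x] else []) = (l.filter p).map f := by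
  induction l with
  | nil => simp
  | cons x xs ih =>
      rw [List.flatMap_cons, List.filter_cons, ih]
      by_cases h : p x <;> simp [h]

theorem pvFiber_eq_bucket (cs : List Char) (t : Nat) (c : Char) :
    (pvAnswer cs).filter (fun y => decide (pvK y = toLex (t + 1, c))) = pvBucket cs t c := by
  unfold pvAnswer pvBucket
  rw [List.filter_flatMap]
  have hinner : ∀ i : Nat,
      (((List.range (cs.length - i)).map (fun x => (cs.drop i).take (x + 1))).filter
        (fun y => decide (pvK y = toLex (t + 1, c)))) =
      if t < cs.length - i ∧ cs.getD i ' ' = c then [(cs.drop i).take (t + 1)] else [] := by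
    intro i
    rw [List.filter_map]
    have hc : ∀ x ∈ List.range (cs.length - i),
        ((fun y => decide (pvK y = toLex (t + 1, c))) ∘ (fun x => (cs.drop i).take (x + 1))) x =
          (decide (x = t) && decide (cs.getD i ' ' = c)) := by
      intro x hx
      have hxlt := List.mem_range.mp hx
      have hlen : ((cs.drop i).take (x + 1)).length = x + 1 := by simp; omega
      simp only [Function.comp_apply, pvK, hlen, pvHead_take_drop, toLex_inj, Prod.mk.injEq]
      by_cases h1 : x = t <;> by_cases h2 : cs.getD i ' ' = c <;> simp [h1]
    rw [List.filter_congr hc]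
    by_cases h2 : cs.getD i ' ' = c
    · simp only [h2, decide_true, Bool.and_true]
      rw [List.filter_eq, List.count_range]
      by_cases ht : t < cs.length - i <;> simp [ht]
    · have hfalse : ∀ x ∈ List.range (cs.length - i),
          (decide (x = t) && decide (cs.getD i ' ' = c)) = (fun _ => false) x :=
        fun x _ => by rw [decide_eq_false h2, Bool.and_false]
      rw [List.filter_congr hfalse, List.filter_false, List.map_nil,
        if_neg (fun h => h2 h.2)]
  rw [List.flatMap_congr (g := fun i =>
    if t < cs.length - i ∧ cs.getD i ' ' = c then [(cs.drop i).take (t + 1)] else [])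
    (fun i _ => hinner i)]
  rw [← pvFlatMap_if_singleton]
  rw [show cs.length = (cs.length - t) + min t cs.length by omega, List.range_add,
    List.flatMap_append]
  have hfst : ∀ i ∈ List.range (cs.length - t),
      (if t < (cs.length - t + min t cs.length) - i ∧ cs.getD i ' ' = c
        then [(cs.drop i).take (t + 1)] else []) =
      (if (cs.getD i ' ' == c) then [(cs.drop i).take (t + 1)] else []) := by
    intro i hi
    have hilt := List.mem_range.mp hi
    have hcond : t < (cs.length - t + min t cs.length) - i := by omega
    by_cases h2 : cs.getD i ' ' = c
    · rw [if_pos ⟨hcond, h2⟩, if_pos (beq_iff_eq.mpr h2)]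
    · rw [if_neg (fun h => h2 h.2), if_neg (fun h => h2 (beq_iff_eq.mp h))]
  have hsnd : ∀ j ∈ (List.range (min t cs.length)).map (fun x => cs.length - t + x),
      (if t < (cs.length - t + min t cs.length) - j ∧ cs.getD j ' ' = c
        then [(cs.drop j).take (t + 1)] else []) = ([] : List (List Char)) := by
    intro j hj
    rcases List.mem_map.mp hj with ⟨x, hx, rfl⟩
    have := List.mem_range.mp hx
    have : ¬ (t < (cs.length - t + min t cs.length) - (cs.length - t + x)) := by omega
    simp [this]
  rw [List.flatMap_congr hfst, List.flatMap_congr hsnd]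
  rw [show cs.length - t + min t cs.length - t = cs.length - t by omega]
  simp

-- Folding an index loop that groups values by key is the fold over the (key, value) pairs.
theorem pvFoldl_pairs (l : List Nat) (k : Nat → Char) (v : Nat → List Char)
    (d : PySem.Dict Char (List (List Char))) :
    l.foldl (fun d i => d.modify (k i) [] (· ++ [v i])) d =
      (l.map (fun i => (k i, v i))).foldl (fun d p => d.modify p.1 [] (· ++ [p.2])) d := by
  rw [List.foldl_map]

theorem genBcore_eq (cs : List Char) :
    genBcore cs = (List.range cs.length).flatMap
      (fun t => (pvChars cs t).flatMap (fun c => pvBucket cs t c)) := by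
  simp only [genBcore]
  rw [PySem.List.pyRange_one,
    show (((cs.length : Int) + 1 - 1)).toNat = cs.length by simp, List.foldl_map]
  have hbody : ∀ (answer : List (List Char)) (t : Nat), t ∈ List.range cs.length →
      ((PySem.List.sorted ((PySem.List.pyRange 0 ((cs.length : Int) - (1 + (t : Int)) + 1) 1).foldl
          (fun (d : PySem.Dict Char (List (List Char))) i =>
            d.modify (PySem.List.pyGetD cs i ' ') []
              (· ++ [PySem.List.slice cs (some i) (some (i + (1 + (t : Int))))]))
          PySem.Dict.empty).keys (fun c => c)).foldl
        (fun answer c => answer ++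
          (((PySem.List.pyRange 0 ((cs.length : Int) - (1 + (t : Int)) + 1) 1).foldl
            (fun (d : PySem.Dict Char (List (List Char))) i =>
              d.modify (PySem.List.pyGetD cs i ' ') []
                (· ++ [PySem.List.slice cs (some i) (some (i + (1 + (t : Int))))]))
            PySem.Dict.empty).getD c [])) answer) =
      answer ++ (pvChars cs t).flatMap (fun c => pvBucket cs t c) := by
    intro answer t ht
    have htn := List.mem_range.mp ht
    rw [show (cs.length : Int) - (1 + (t : Int)) + 1 = ((cs.length - t : Nat) : Int) by
      push_cast [Nat.cast_sub (by omega : t ≤ cs.length)]; ring,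
      PySem.List.pyRange_zero_nat, List.foldl_map]
    have hstep : (fun (d : PySem.Dict Char (List (List Char))) (k : Nat) =>
        d.modify (PySem.List.pyGetD cs (k : Int) ' ') []
          (· ++ [PySem.List.slice cs (some (k : Int)) (some ((k : Int) + (1 + (t : Int))))])) =
        (fun d k => d.modify (cs.getD k ' ') [] (· ++ [(cs.drop k).take (t + 1)])) := by
      funext d k
      rw [PySem.List.pyGetD_natCast,
        show (k : Int) + (1 + (t : Int)) = ((k + (t + 1) : Nat) : Int) by push_cast; ring,
        PySem.List.slice_natCast, show k + (t + 1) - k = t + 1 by omega]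
    rw [hstep, pvFoldl_pairs (List.range (cs.length - t)) (fun k => cs.getD k ' ')
      (fun k => (cs.drop k).take (t + 1)) PySem.Dict.empty]
    set pairs : List (Char × List Char) :=
      (List.range (cs.length - t)).map (fun k => (cs.getD k ' ', (cs.drop k).take (t + 1)))
      with hpairs
    have hkeys : ((pairs.foldl (fun d p => d.modify p.1 [] (· ++ [p.2]))
        (PySem.Dict.empty : PySem.Dict Char (List (List Char))))).keys =
        PySem.Set.ofList ((List.range (cs.length - t)).map (fun i => cs.getD i ' ')) := by
      rw [PySem.Dict.keys_foldl_modify_key pairs Prod.fst [] (fun _ p => (· ++ [p.2]))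
        PySem.Dict.empty]
      rw [show (PySem.Dict.empty : PySem.Dict Char (List (List Char))).keys = [] from rfl,
        PySem.Set.update, ← PySem.Set.ofList_eq_foldl, hpairs, List.map_map]
      rfl
    have hgetD : ∀ c : Char, ((pairs.foldl (fun d p => d.modify p.1 [] (· ++ [p.2]))
        (PySem.Dict.empty : PySem.Dict Char (List (List Char))))).getD c [] = pvBucket cs t c := by
      intro c
      rw [PySem.Dict.getD_foldl_modify_append pairs PySem.Dict.empty c]
      rw [show (PySem.Dict.empty : PySem.Dict Char (List (List Char))).getD c [] = [] from rfl,
        hpairs, List.filter_map, List.map_map]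
      simp only [List.nil_append]
      rfl
    rw [hkeys]
    have hemit : (fun (answer : List (List Char)) (c : Char) => answer ++
        ((pairs.foldl (fun d p => d.modify p.1 [] (· ++ [p.2]))
          (PySem.Dict.empty : PySem.Dict Char (List (List Char))))).getD c []) =
        (fun answer c => answer ++ pvBucket cs t c) := by
      funext answer c
      rw [hgetD c]
    rw [hemit, PySem.List.foldl_append_eq_flatMap]
    rfl
  refine (PySem.List.foldl_congr_mem _ _ _ _ hbody).trans ?_
  rw [PySem.List.foldl_append_eq_flatMap]
  simp

theorem genAcore_eq_genBcore (cs : List Char) : genAcore cs = genBcore cs := by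
  rw [genAcore_eq, genBcore_eq, pvKs, List.flatMap_assoc]
  refine List.flatMap_congr (fun t _ => ?_)
  rw [List.flatMap_map]
  exact List.flatMap_congr (fun c _ => pvFiber_eq_bucket cs t c)

-- ===== VERDICT (by name: the statement is the Claim_ definition above) =====
theorem generate_spec : Claim_equal_generate := by
  intro s _
  unfold Spec_generate generate generate_alt
  rw [genAcore_eq_genBcore]
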